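-- pv_equiv track=rewrite | github.com/PKTOSE/2022_opensource_proposal | src/set_recur.py | set4
-- ===== SOURCE A (Python) =====
-- def set4(n: int, X: set):
--     if n == 0: return {4}
--     Y = set4(n - 1, X).copy()
--     for x in Y:
--         X.add(x)
--         X.add(x - 12)
--         X.add(x ** 2)
--     return X
-- ===== SOURCE B (Python) =====
-- def set4(n: int, X: set):
--     # Iterative version: same in-place mutation of X as the original,
--     # but a bottom-up loop over levels instead of a linear recursion.
--     if n == 0:
--         return {4}
--     Y = {4}
--     for _ in range(n):
--         for x in Y:
--             X.add(x)
--             X.add(x - 12)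
--             X.add(x ** 2)
--         Y = X.copy()
--     return X
-- ===== Notes on version B (the rewrite author's own statement) =====
-- stated objective: alternative
-- what changed: Replaced the linear self-recursion (n nested calls unwinding to the {4} base) by an explicit bottom-up loop that runs n rounds over a frontier snapshot, keeping the same in-place mutation of X.
import Mathlib
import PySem

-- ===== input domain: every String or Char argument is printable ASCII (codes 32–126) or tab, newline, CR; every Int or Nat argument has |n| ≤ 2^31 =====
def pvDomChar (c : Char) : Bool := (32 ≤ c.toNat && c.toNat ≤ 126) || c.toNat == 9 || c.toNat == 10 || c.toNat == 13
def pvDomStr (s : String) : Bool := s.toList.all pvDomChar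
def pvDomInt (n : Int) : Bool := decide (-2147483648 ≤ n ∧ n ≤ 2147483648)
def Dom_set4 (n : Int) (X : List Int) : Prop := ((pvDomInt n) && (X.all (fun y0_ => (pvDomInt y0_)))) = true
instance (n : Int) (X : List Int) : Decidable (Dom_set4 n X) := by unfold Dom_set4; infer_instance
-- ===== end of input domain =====

-- B replaces A's linear self-recursion by an explicit bottom-up loop over n rounds;
-- both mutate the caller's set X identically for n ≥ 1 (the equivalence proved is about
-- the returned set, which for n ≥ 1 is that mutated X in both versions).

-- ===== PORT A =====
-- the body of 'for x in Y: X.add(x); X.add(x-12); X.add(x**2)' (shared literally by both Pythons)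
def set4Step (X : PySem.Set Int) (x : Int) : PySem.Set Int :=
  PySem.Set.add (PySem.Set.add (PySem.Set.add X x) (x - 12)) (x * x)

-- recursion of A on a Nat counter, threading the mutated X; returns (return value, X after)
def set4A : Nat → PySem.Set Int → (PySem.Set Int × PySem.Set Int)
  | 0, X => (PySem.Set.ofList [4], X)
  | k + 1, X =>
      let r := set4A k X
      let Y := r.1                      -- Y = set4(n-1, X).copy()
      let X1 := Y.foldl set4Step r.2    -- for x in Y: X.add(x); X.add(x-12); X.add(x**2)
      (X1, X1)                          -- return X

-- A recurses forever for n < 0 (RecursionError): Pre_ excludes n < 0; toNat only realises the guard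
def set4 (n : Int) (X : List Int) : List Int :=
  (set4A n.toNat (PySem.Set.ofList X)).1

-- ===== PORT B =====
-- the n-round loop: 'for _ in range(n): for x in Y: …; Y = X.copy()'
def set4B : Nat → PySem.Set Int → PySem.Set Int → PySem.Set Int
  | 0, X, _ => X
  | k + 1, X, Y =>
      let X1 := Y.foldl set4Step X
      set4B k X1 X1                     -- Y = X.copy()

def set4_alt (n : Int) (X : List Int) : List Int :=
  if n == 0 then PySem.Set.ofList [4]
  else set4B n.toNat (PySem.Set.ofList X) (PySem.Set.ofList [4])

-- ===== PRECONDITION & SPEC =====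
-- A recurses without bound (RecursionError) for n < 0: those inputs are excluded.
def Pre_set4 (n : Int) (X : List Int) : Prop := 0 ≤ n
instance (n : Int) (X : List Int) : Decidable (Pre_set4 n X) := by unfold Pre_set4; infer_instance
def pvWitness_set4 : Int × List Int := (2, [3, 7])

def Spec_set4 (n : Int) (X : List Int) (out : List Int) : Prop := out = set4_alt n X
instance (n : Int) (X : List Int) (out : List Int) : Decidable (Spec_set4 n X out) := by unfold Spec_set4; infer_instance

-- ===== CLAIM (what is proved, stated in full; the proofs are below) =====
def Claim_equal_set4 : Prop := ∀ (n : Int) (X : List Int), Dom_set4 n X → Pre_set4 n X → Spec_set4 n X (set4 n X)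

-- ===== LEMMAS AND PROOFS =====

-- running one extra round at the end equals running it at the start
theorem set4B_succ (k : Nat) (S : PySem.Set Int) :
    set4B (k + 1) S S = (fun T => T.foldl set4Step T) (set4B k S S) := by
  induction k generalizing S with
  | zero => rfl
  | succ k ih =>
      show set4B (k + 1) (S.foldl set4Step S) (S.foldl set4Step S) = _
      rw [ih]
      rfl

-- A's recursion computed level by level equals B's loop
theorem set4A_eq (k : Nat) (X0 : PySem.Set Int) :
    set4A (k + 1) X0 =
      (set4B k ((PySem.Set.ofList [4]).foldl set4Step X0) ((PySem.Set.ofList [4]).foldl set4Step X0),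
       set4B k ((PySem.Set.ofList [4]).foldl set4Step X0) ((PySem.Set.ofList [4]).foldl set4Step X0)) := by
  induction k with
  | zero => rfl
  | succ k ih =>
      show (let r := set4A (k + 1) X0
            let X1 := r.1.foldl set4Step r.2
            ((X1, X1) : PySem.Set Int × PySem.Set Int)) = _
      rw [ih, set4B_succ]

-- ===== VERDICT (by name: the statement is the Claim_ definition above) =====
theorem set4_spec : Claim_equal_set4 := by
  intro n X _ hpre
  unfold Spec_set4 set4 set4_alt
  by_cases h0 : n = 0
  · subst h0; rfl
  · have hn : n.toNat ≠ 0 := by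
      unfold Pre_set4 at hpre; omega
    obtain ⟨k, hk⟩ := Nat.exists_eq_succ_of_ne_zero hn
    simp only [beq_iff_eq, if_neg h0, hk, set4A_eq]
    rfl
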